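-- pv_equiv track=rewrite | github.com/MakarenkoAI/UNIV | aois/aois-4/cutting.py | bonding
-- ===== SOURCE A (Python) =====
-- def able_to_bonding(first_keys:list, second_keys:list):
--     matches:int = 0
--     compare = len(first_keys)-1
--     for index in range(len(first_keys)):
--         if first_keys[index] == second_keys[index]:
--             matches = matches + 1
--     return matches == compare
--
-- def bonding(values:list, in_s:str, out_s:str):
--     bond_list:list=[]
--     index:int = 0
--     while index < len(values):
--         keys_1:list = define_keys(values[index])
--         index_next = index + 1
--         while index_next < len(values):
--             keys_2:list = define_keys(values[index_next])
--             if able_to_bonding(keys_1, keys_2):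
--                 bond_list.append(merge(keys_1, keys_2, in_s))
--             index_next = index_next + 1
--         index = index + 1
--
--     return bond_list
--
-- def define_keys(sub:str):
--     keys:list=[]
--     index:int = 0
--     while index < len(sub):
--         if sub[index] == '!':
--             keys.append(0)
--             index = index + 3
--         else:
--             keys.append(1)
--             index = index + 2
--     return keys
--
-- def merge(sub_1:str, sub_2:str, in_s:str):
--     letters:list = ['A', 'B', 'C', 'D']
--     new_key=''
--     for el in range(len(sub_1)):
--         if sub_1[el] == sub_2[el]:
--             if sub_1[el] == 1:
--                 new_key = new_key + letters[el] + in_s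
--             if sub_1[el] == 0:
--                 new_key = new_key + '!' + letters[el] + in_s
--     new_key = new_key[:-1]
--     return new_key
-- ===== SOURCE B (Python) =====
-- def _parse(s):
--     keys = []
--     i = 0
--     while i < len(s):
--         if s[i] == '!':
--             keys.append(0)
--             i += 3
--         else:
--             keys.append(1)
--             i += 2
--     return keys
--
--
-- def _render(a, p, in_s):
--     letters = 'ABCD'
--     pieces = []
--     for el in range(len(a)):
--         if el != p:
--             pieces.append((letters[el] if a[el] == 1 else '!' + letters[el]) + in_s)
--     return ''.join(pieces)[:-1]
--
--
-- def bonding(values, in_s, out_s):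
--     keys = [_parse(v) for v in values]
--     n = len(keys)
--     out = []
--     for i in range(n):
--         a = keys[i]
--         la = len(a)
--         flips = {}
--         for p in range(la):
--             t = list(a)
--             t[p] = 1 - t[p]
--             flips[tuple(t)] = p
--         for j in range(i + 1, n):
--             p = flips.get(tuple(keys[j][:la]))
--             if p is not None:
--                 out.append(_render(a, p, in_s))
--     return out
-- ===== Notes on version B (the rewrite author's own statement) =====
-- stated objective: faster
-- what changed: B parses every value once up front and, for each key, builds a hash table of its single-bit-flip neighbour keys which is probed with each later key's prefix (the unique flip position then determines the merged string directly), replacing A's per-pair re-parsing, mismatch counting and two-key merge scan.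
import Mathlib
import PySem

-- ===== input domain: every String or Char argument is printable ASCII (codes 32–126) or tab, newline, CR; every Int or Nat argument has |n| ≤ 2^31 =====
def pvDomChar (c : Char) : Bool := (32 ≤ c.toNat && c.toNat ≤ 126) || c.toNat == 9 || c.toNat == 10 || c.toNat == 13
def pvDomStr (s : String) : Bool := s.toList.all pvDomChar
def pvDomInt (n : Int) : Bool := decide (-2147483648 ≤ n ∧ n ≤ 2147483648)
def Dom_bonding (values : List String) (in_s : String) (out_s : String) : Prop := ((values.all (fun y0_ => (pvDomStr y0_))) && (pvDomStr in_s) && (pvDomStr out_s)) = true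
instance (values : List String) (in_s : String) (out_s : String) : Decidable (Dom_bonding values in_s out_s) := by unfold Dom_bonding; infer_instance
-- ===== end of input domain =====

-- B replaces A's per-pair mismatch counting by a per-key hash table of the key's single-flip
-- neighbours probed with the other key's prefix (objective: alternative; same return value).

-- ===== PORT A =====
-- define_keys: while loop with index steps of 2/3; s[index] is always in range when read
def defineKeys (cs : List Char) (i : Nat) : List Nat :=
  if h : i < cs.length then
    if cs[i] = '!' then 0 :: defineKeys cs (i + 3) else 1 :: defineKeys cs (i + 2)
  else []
termination_by cs.length - i
decreasing_by all_goals omega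

-- able_to_bonding: second_keys[index] raises IndexError when second is shorter (outside Pre_);
-- getD defaults 0/2 never compare equal out of range
def ableToBonding (first_keys second_keys : List Nat) : Bool :=
  let compare : Int := (first_keys.length : Int) - 1
  let matched : Int := (List.range first_keys.length).foldl
    (fun m index => if first_keys.getD index 0 = second_keys.getD index 2 then m + 1 else m) 0
  decide (matched = compare)

-- merge: letters[el] raises IndexError for el ≥ 4 (outside Pre_); new_key[:-1] = dropLast (exact)
def mergeA (sub_1 sub_2 : List Nat) (in_s : List Char) : List Char :=
  let letters : List (List Char) := [['A'], ['B'], ['C'], ['D']]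
  let new_key := (List.range sub_1.length).foldl (fun nk el =>
    if sub_1.getD el 0 = sub_2.getD el 2 then
      let nk1 := if sub_1.getD el 0 = 1 then nk ++ letters.getD el [] ++ in_s else nk
      if sub_1.getD el 0 = 0 then nk1 ++ '!' :: (letters.getD el [] ++ in_s) else nk1
    else nk) []
  new_key.dropLast

-- the two while loops with unit increments, as folds over their index ranges
def bonding (values : List String) (in_s : String) (out_s : String) : List String :=
  (List.range values.length).foldl (fun bond_list index =>
    let keys_1 := defineKeys (values.getD index "").toList 0
    (List.range' (index + 1) (values.length - (index + 1))).foldl (fun bl index_next =>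
      let keys_2 := defineKeys (values.getD index_next "").toList 0
      if ableToBonding keys_1 keys_2 then bl ++ [String.ofList (mergeA keys_1 keys_2 in_s.toList)]
      else bl) bond_list) []

-- ===== PORT B =====
-- B's recursive parser; the fuel argument (initially the string length, enough for every step,
-- which consumes ≥ 1 character) only makes the recursion structural — same computation
def parseFuel : Nat → List Char → List Nat
  | 0, _ => []
  | _ + 1, [] => []
  | fuel + 1, c :: rest =>
    if c = '!' then 0 :: parseFuel fuel (rest.drop 2) else 1 :: parseFuel fuel (rest.drop 1)

def parseKeys (cs : List Char) : List Nat := parseFuel cs.length cs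

-- B's _render: 'ABCD'[el] raises for el ≥ 4 (outside Pre_); ''.join(pieces)[:-1] = flatten+dropLast
def renderB (a : List Nat) (p : Nat) (in_s : List Char) : List Char :=
  let letters : List Char := ['A', 'B', 'C', 'D']
  let pieces := (List.range a.length).foldl (fun ps el =>
    if el ≠ p then
      ps ++ [(if a.getD el 0 = 1 then [letters.getD el ' ']
              else '!' :: [letters.getD el ' ']) ++ in_s]
    else ps) []
  pieces.flatten.dropLast

def bonding_alt (values : List String) (in_s : String) (out_s : String) : List String :=
  let keys := values.map (fun v => parseKeys v.toList)
  let n := keys.length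
  (List.range n).foldl (fun out i =>
    let a := keys.getD i []
    let la := a.length
    let flips : PySem.Dict (List Nat) Nat :=
      (List.range la).foldl (fun d p => d.insert (a.set p (1 - a.getD p 0)) p) PySem.Dict.empty
    (List.range' (i + 1) (n - (i + 1))).foldl (fun out j =>
      match flips.get? ((keys.getD j []).take la) with
      | some p => out ++ [String.ofList (renderB a p in_s.toList)]
      | none => out) out) []

-- ===== PRECONDITION & SPEC =====
def pvKeysAt (values : List String) (k : Nat) : List Nat := parseKeys (values.getD k "").toList

def pvMatchCount (a b : List Nat) : Nat :=
  (List.range a.length).countP (fun el => a.getD el 0 == b.getD el 1)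

-- every later key list is at least as long as every earlier one (else able_to_bonding raises IndexError)
def pvLenOK (values : List String) : Bool :=
  (List.range values.length).all (fun j => (List.range j).all (fun i =>
    (pvKeysAt values i).length ≤ (pvKeysAt values j).length))

-- whenever a pair bonds, every matching position is < 4 (else merge's letters[el] raises IndexError)
def pvBondSafe (values : List String) : Bool :=
  (List.range values.length).all (fun j => (List.range j).all (fun i =>
    let a := pvKeysAt values i
    let b := pvKeysAt values j
    !(a.length ≤ b.length && ((pvMatchCount a b : Int) == (a.length : Int) - 1)) ||
      (List.range a.length).all (fun el => !(a.getD el 0 == b.getD el 1) || el < 4)))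

-- Pre_ = exactly the inputs on which A returns (A raises IndexError on the others)
def Pre_bonding (values : List String) (in_s : String) (out_s : String) : Prop :=
  pvLenOK values = true ∧ pvBondSafe values = true
instance (values : List String) (in_s : String) (out_s : String) : Decidable (Pre_bonding values in_s out_s) := by
  unfold Pre_bonding; infer_instance

def pvWitness_bonding : List String × String × String := (["A ", "!A "], "", "")

def Spec_bonding (values : List String) (in_s : String) (out_s : String) (out : List String) : Prop := out = bonding_alt values in_s out_s
instance (values : List String) (in_s : String) (out_s : String) (out : List String) : Decidable (Spec_bonding values in_s out_s out) := by unfold Spec_bonding; infer_instance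

-- ===== CLAIM (what is proved, stated in full; the proofs are below) =====
def Claim_equal_bonding : Prop := ∀ (values : List String) (in_s : String) (out_s : String), Dom_bonding values in_s out_s → Pre_bonding values in_s out_s → Spec_bonding values in_s out_s (bonding values in_s out_s)

-- ===== LEMMAS AND PROOFS =====

theorem parseFuel_adequate : ∀ f cs, List.length cs ≤ f → parseFuel f cs = parseKeys cs := by
  intro f
  induction f using Nat.strong_induction_on with
  | _ f ih =>
    intro cs h
    match f, cs with
    | 0, [] => rfl
    | 0, c :: rest => simp at h
    | f + 1, [] => rfl
    | f + 1, c :: rest =>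
      simp only [List.length_cons] at h
      have hd2 : (rest.drop 2).length <= rest.length := by simp
      have hd1 : (rest.drop 1).length <= rest.length := by simp
      simp only [parseKeys, List.length_cons, parseFuel]
      rw [ih f (by omega) _ (by simp; omega), ih f (by omega) _ (by simp; omega),
          ih rest.length (by omega) _ hd2, ih rest.length (by omega) _ hd1]

theorem parseKeys_cons (c : Char) (rest : List Char) :
    parseKeys (c :: rest) = if c = '!' then 0 :: parseKeys (rest.drop 2) else 1 :: parseKeys (rest.drop 1) := by
  simp only [parseKeys, List.length_cons, parseFuel]
  rw [parseFuel_adequate rest.length _ (by simp), parseFuel_adequate rest.length _ (by simp)]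
  rfl

theorem defineKeys_eq_parse (cs : List Char) (i : Nat) : defineKeys cs i = parseKeys (cs.drop i) := by
  fun_induction defineKeys with
  | case1 i h hc ih =>
    rw [List.drop_eq_getElem_cons h, parseKeys_cons, if_pos hc, List.drop_drop, ih]
  | case2 i h hc ih =>
    rw [List.drop_eq_getElem_cons h, parseKeys_cons, if_neg hc, List.drop_drop, ih]
  | case3 i h =>
    rw [List.drop_eq_nil_iff.mpr (by omega)]; rfl

theorem parseKeys_binary (cs : List Char) : ∀ x ∈ parseKeys cs, x = 0 ∨ x = 1 := by
  have key : ∀ f cs, ∀ x ∈ parseFuel f cs, x = 0 ∨ x = 1 := by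
    intro f
    induction f with
    | zero => intro cs x hx; simp [parseFuel] at hx
    | succ f ih =>
      intro cs x hx
      match cs with
      | [] => simp [parseFuel] at hx
      | c :: rest =>
        simp only [parseFuel] at hx
        split at hx <;> rcases List.mem_cons.mp hx with h | h <;>
          first | exact Or.inl h | exact Or.inr h | exact ih _ _ h
  exact key _ cs

theorem count_iff_flip (a b : List Nat) (ha : ∀ x ∈ a, x = 0 ∨ x = 1) (hb : ∀ x ∈ b, x = 0 ∨ x = 1)
    (hl : a.length ≤ b.length) :
    ((pvMatchCount a b : Int) = (a.length : Int) - 1) ↔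
      ∃ p, p < a.length ∧ b.take a.length = a.set p (1 - a.getD p 0) := by
  have hMle : pvMatchCount a b ≤ a.length := by
    simpa [pvMatchCount] using List.countP_le_length (l := List.range a.length)
      (p := fun el => a.getD el 0 == b.getD el 1)
  have hsplit := List.length_eq_countP_add_countP
    (p := fun el => a.getD el 0 == b.getD el 1) (l := List.range a.length)
  have hflip : (List.range a.length).countP (fun el => !(a.getD el 0 == b.getD el 1))
      = List.countP (fun a_1 => decide ¬(a.getD a_1 0 == b.getD a_1 1) = true) (List.range a.length) := by
    apply List.countP_congr
    intro x _
    simp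
  rw [← hflip, List.length_range] at hsplit
  have hlen : (List.range a.length).length = a.length := List.length_range
  have step1 : ((pvMatchCount a b : Int) = (a.length : Int) - 1) ↔
      (List.range a.length).countP (fun el => !(a.getD el 0 == b.getD el 1)) = 1 := by
    unfold pvMatchCount at *
    omega
  rw [step1]
  constructor
  · intro h
    rw [List.countP_eq_length_filter] at h
    obtain ⟨p, hp⟩ := List.length_eq_one_iff.mp h
    have hpmem : p ∈ (List.range a.length).filter (fun el => !(a.getD el 0 == b.getD el 1)) := by
      rw [hp]; exact List.mem_singleton.mpr rfl
    have hpr := List.mem_filter.mp hpmem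
    have hplt : p < a.length := List.mem_range.mp hpr.1
    have hpne : ¬ (a.getD p 0 = b.getD p 1) := by simpa using hpr.2
    refine ⟨p, hplt, ?_⟩
    have hmatch : ∀ q, q < a.length → q ≠ p → a.getD q 0 = b.getD q 1 := by
      intro q hq hqp
      by_contra hne
      have : q ∈ (List.range a.length).filter (fun el => !(a.getD el 0 == b.getD el 1)) := by
        refine List.mem_filter.mpr ⟨List.mem_range.mpr hq, by simpa using hne⟩
      rw [hp] at this
      exact hqp (List.mem_singleton.mp this)
    apply List.ext_getElem
    · simp [List.length_take, Nat.min_eq_left hl]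
    · intro el h1 h2
      have hel : el < a.length := by simpa using h2
      have helb : el < b.length := lt_of_lt_of_le hel hl
      rw [List.getElem_take]
      by_cases hep : el = p
      · subst hep
        rw [List.getElem_set_self (by simpa using hel)]
        rw [List.getD_eq_getElem a 0 hel]
        rcases ha a[el] (List.getElem_mem hel) with h0 | h0 <;>
          rcases hb b[el] (List.getElem_mem helb) with h1' | h1' <;>
            rw [List.getD_eq_getElem a 0 hel, List.getD_eq_getElem b 1 helb] at hpne <;>
              omega
      · rw [List.getElem_set_ne (fun hh => hep hh.symm) (by simpa using hel)]
        have := hmatch el hel hep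
        rw [List.getD_eq_getElem a 0 hel, List.getD_eq_getElem b 1 helb] at this
        omega
  · rintro ⟨p, hplt, htake⟩
    have hcong : (List.range a.length).countP (fun el => !(a.getD el 0 == b.getD el 1)) =
        (List.range a.length).countP (fun el => el == p) := by
      apply List.countP_congr
      intro el helm
      have hel : el < a.length := List.mem_range.mp helm
      have helb : el < b.length := lt_of_lt_of_le hel hl
      have hbel0 : (List.take a.length b)[el]'(by simpa [Nat.min_eq_left hl] using hel)
          = (a.set p (1 - a.getD p 0))[el]'(by simpa using hel) := List.getElem_of_eq htake _
      have hbel : b[el] = (a.set p (1 - a.getD p 0))[el]'(by simpa using hel) := by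
        rw [← hbel0, List.getElem_take]
      have hga : a[el]? = some a[el] := List.getElem?_eq_getElem hel
      have hgb : b[el]? = some b[el] := List.getElem?_eq_getElem helb
      have h0 : a.getD el 0 = a[el] := List.getD_eq_getElem a 0 hel
      by_cases hep : el = p
      · subst hep
        rw [List.getElem_set_self (by simpa using hel)] at hbel
        rw [h0] at hbel
        rcases ha a[el] (List.getElem_mem hel) with hx | hx <;>
          simp [List.getD, hga, hgb, hbel, hx]
      · rw [List.getElem_set_ne (fun hh => hep hh.symm) (by simpa using hel)] at hbel
        simp [List.getD, hga, hgb, hbel, hep]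
    rw [hcong]
    have : (List.range a.length).countP (fun el => el == p) = (List.range a.length).count p := rfl
    rw [this, List.count_range]
    simp [hplt]

theorem flip_inj (a : List Nat) (ha : ∀ x ∈ a, x = 0 ∨ x = 1) :
    ∀ p q, p < a.length → q < a.length →
      a.set p (1 - a.getD p 0) = a.set q (1 - a.getD q 0) → p = q := by
  intro p q hp hq h
  by_contra hne
  have hg : (a.set p (1 - a.getD p 0))[p]'(by simpa using hp)
      = (a.set q (1 - a.getD q 0))[p]'(by simpa using hp) := List.getElem_of_eq h _
  rw [List.getElem_set_self (by simpa using hp),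
      List.getElem_set_ne (fun hh => hne hh.symm) (by simpa using hp)] at hg
  rw [List.getD_eq_getElem a 0 hp] at hg
  rcases ha a[p] (List.getElem_mem hp) with hx | hx <;> omega

theorem dict_range_get? : ∀ (n : Nat) (f : Nat → List Nat),
    (∀ p q, p < n → q < n → f p = f q → p = q) → ∀ (t : List Nat) (p : Nat),
    ((((List.range n).foldl (fun d k => d.insert (f k) k) PySem.Dict.empty).get? t = some p)
      ↔ (p < n ∧ f p = t)) := by
  intro n
  induction n with
  | zero => intro f _ t p; simp [PySem.Dict.get?_empty]
  | succ n ih =>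
    intro f hinj t p
    rw [List.range_succ, List.foldl_append, List.foldl_cons, List.foldl_nil,
        PySem.Dict.get?_insert]
    by_cases ht : t = f n
    · rw [if_pos ht]
      constructor
      · intro h
        have : p = n := by simpa using h.symm
        exact ⟨by omega, by rw [this, ht]⟩
      · rintro ⟨hlt, hfp⟩
        have : p = n := hinj p n hlt (by omega) (by rw [hfp, ht])
        rw [this]
      
    · rw [if_neg ht]
      rw [ih f (fun p q hp hq h => hinj p q (by omega) (by omega) h) t p]
      constructor
      · rintro ⟨hlt, hfp⟩; exact ⟨by omega, hfp⟩
      · rintro ⟨hlt, hfp⟩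
        refine ⟨?_, hfp⟩
        rcases Nat.lt_succ_iff_lt_or_eq.mp hlt with h | h
        · exact h
        · exact absurd (h ▸ hfp).symm ht

theorem able_eq_count (a b : List Nat) (hl : a.length ≤ b.length) :
    (ableToBonding a b = true) ↔ ((pvMatchCount a b : Int) = (a.length : Int) - 1) := by
  unfold ableToBonding pvMatchCount
  rw [PySem.List.foldl_ite_add_one]
  have hc : (List.range a.length).countP (fun x => decide (a.getD x 0 = b.getD x 2))
      = (List.range a.length).countP (fun el => a.getD el 0 == b.getD el 1) := by
    apply List.countP_congr
    intro x hx
    have hxa : x < a.length := List.mem_range.mp hx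
    have hxb : x < b.length := lt_of_lt_of_le hxa hl
    rw [List.getD_eq_getElem b 2 hxb, List.getD_eq_getElem b 1 hxb]
    simp
  simp only [hc, zero_add, decide_eq_true_eq]

theorem flatten_map_filter (l : List Nat) (q : Nat → Bool) (f : Nat → List Char) :
    ((l.filter q).map f).flatten = l.flatMap (fun x => if q x then f x else []) := by
  induction l with
  | nil => rfl
  | cons x xs ih =>
    by_cases hx : q x <;> simp [hx, ih]

theorem merge_eq_render (a b : List Nat) (in_s : List Char)
    (ha : ∀ x ∈ a, x = 0 ∨ x = 1)
    (hl : a.length ≤ b.length) (p : Nat) (hp : p < a.length)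
    (htake : b.take a.length = a.set p (1 - a.getD p 0))
    (hsafe : ∀ el, el < a.length → a.getD el 0 = b.getD el 1 → el < 4) :
    mergeA a b in_s = renderB a p in_s := by
  unfold mergeA renderB
  dsimp only
  have hb_el : ∀ el (hel : el < a.length),
      b[el]'(lt_of_lt_of_le hel hl) = (a.set p (1 - a.getD p 0))[el]'(by simpa using hel) := by
    intro el hel
    have h0 : (List.take a.length b)[el]'(by simpa [Nat.min_eq_left hl] using hel)
        = (a.set p (1 - a.getD p 0))[el]'(by simpa using hel) := List.getElem_of_eq htake _
    rw [← h0, List.getElem_take]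
  have stepA : (List.range a.length).foldl (fun nk el =>
      if a.getD el 0 = b.getD el 2 then
        let nk1 := if a.getD el 0 = 1 then nk ++ ([['A'],['B'],['C'],['D']] : List (List Char)).getD el [] ++ in_s else nk
        if a.getD el 0 = 0 then nk1 ++ '!' :: (([['A'],['B'],['C'],['D']] : List (List Char)).getD el [] ++ in_s) else nk1
      else nk) []
      = (List.range a.length).foldl (fun nk el => nk ++
          (if el = p then [] else
            (if a.getD el 0 = 1 then [(['A','B','C','D'] : List Char).getD el ' ']
             else '!' :: [(['A','B','C','D'] : List Char).getD el ' ']) ++ in_s)) [] := by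
    apply PySem.List.foldl_congr_mem
    intro nk el helm
    have hel : el < a.length := List.mem_range.mp helm
    have helb : el < b.length := lt_of_lt_of_le hel hl
    have hga : a.getD el 0 = a[el]'hel := List.getD_eq_getElem a 0 hel
    have hgb2 : b.getD el 2 = b[el]'helb := List.getD_eq_getElem b 2 helb
    have hgb1 : b.getD el 1 = b[el]'helb := List.getD_eq_getElem b 1 helb
    by_cases hep : el = p
    · subst hep
      have hset : b[el]'helb = 1 - a.getD el 0 := by
        rw [hb_el el hel, List.getElem_set_self (by simpa using hel)]
      rcases ha (a[el]'hel) (List.getElem_mem hel) with hx | hx <;>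
        rw [if_neg (by omega), if_pos rfl] <;> simp
    · have hset : b[el]'helb = a[el]'hel := by
        rw [hb_el el hel, List.getElem_set_ne (fun hh => hep hh.symm) (by simpa using hel)]
      have hmatch : a.getD el 0 = b.getD el 2 := by rw [hga, hgb2, hset]
      have h4 : el < 4 := hsafe el hel (by rw [hga, hgb1, hset])
      have hlet : (([['A'],['B'],['C'],['D']] : List (List Char)).getD el [])
          = [(['A','B','C','D'] : List Char).getD el ' '] := by
        interval_cases el <;> rfl
      rw [if_pos hmatch, if_neg hep, hlet]
      rcases ha (a[el]'hel) (List.getElem_mem hel) with hx | hx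
      · rw [hga, hx]
        norm_num
      · rw [hga, hx]
        norm_num
  have stepB : (List.range a.length).foldl (fun ps el =>
      if el ≠ p then
        ps ++ [(if a.getD el 0 = 1 then [(['A','B','C','D'] : List Char).getD el ' ']
                else '!' :: [(['A','B','C','D'] : List Char).getD el ' ']) ++ in_s]
      else ps) []
      = (List.range a.length).foldl (fun ps el =>
      if (el != p) then
        ps ++ [(if a.getD el 0 = 1 then [(['A','B','C','D'] : List Char).getD el ' ']
                else '!' :: [(['A','B','C','D'] : List Char).getD el ' ']) ++ in_s]
      else ps) [] := by
    apply PySem.List.foldl_congr_mem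
    intro ps el _
    by_cases hep : el = p <;> simp [hep]
  rw [stepA, stepB, PySem.List.foldl_append_eq_flatMap, PySem.List.foldl_append_if,
      List.nil_append, List.nil_append, flatten_map_filter]
  congr 1
  apply List.flatMap_congr
  intro el _
  by_cases hep : el = p <;> simp [hep]

-- ===== VERDICT (by name: the statement is the Claim_ definition above) =====
theorem keys_getD (values : List String) (k : Nat) (hk : k < values.length) :
    (values.map (fun v => parseKeys v.toList)).getD k [] = pvKeysAt values k := by
  unfold pvKeysAt
  rw [List.getD_eq_getElem _ [] (by simpa using hk), List.getElem_map,
      List.getD_eq_getElem _ "" hk]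

theorem bonding_spec : Claim_equal_bonding := by
  intro values in_s out_s _ hPre
  obtain ⟨hLen, hSafe⟩ := hPre
  simp only [pvLenOK, List.all_eq_true, List.mem_range] at hLen
  simp only [pvBondSafe, List.all_eq_true, List.mem_range] at hSafe
  unfold Spec_bonding bonding bonding_alt
  dsimp only
  rw [List.length_map]
  apply PySem.List.foldl_congr_mem
  intro acc i hi
  have hin : i < values.length := List.mem_range.mp hi
  apply PySem.List.foldl_congr_mem
  intro bl j hj
  have hjr := List.mem_range'.mp hj
  have hij : i < j := by omega
  have hjn : j < values.length := by omega
  rw [keys_getD values i hin, keys_getD values j hjn]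
  rw [defineKeys_eq_parse, defineKeys_eq_parse, List.drop_zero, List.drop_zero,
      show parseKeys (values.getD i "").toList = pvKeysAt values i from rfl,
      show parseKeys (values.getD j "").toList = pvKeysAt values j from rfl]
  set a := pvKeysAt values i with hadef
  set b := pvKeysAt values j with hbdef
  have ha : ∀ x ∈ a, x = 0 ∨ x = 1 := parseKeys_binary _
  have hb : ∀ x ∈ b, x = 0 ∨ x = 1 := parseKeys_binary _
  have hab : a.length ≤ b.length := by
    have := hLen j hjn i hij
    simpa using this
  by_cases hcnt : (pvMatchCount a b : Int) = (a.length : Int) - 1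
  · obtain ⟨p, hp, htake⟩ := (count_iff_flip a b ha hb hab).mp hcnt
    have hlookup := (dict_range_get? a.length
      (fun k => a.set k (1 - a.getD k 0)) (flip_inj a ha) (b.take a.length) p).mpr ⟨hp, htake.symm⟩
    rw [hlookup, if_pos ((able_eq_count a b hab).mpr hcnt)]
    have hsafe : ∀ el, el < a.length → a.getD el 0 = b.getD el 1 → el < 4 := by
      have h := hSafe j hjn i hij
      rw [← hadef, ← hbdef] at h
      rcases Bool.or_eq_true _ _ |>.mp h with h | h
      · exfalso
        rw [Bool.not_eq_true', Bool.and_eq_false_iff] at h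
        rcases h with h | h
        · exact absurd hab (by simpa using h)
        · exact absurd hcnt (by simpa using h)
      · intro el hel hm
        simp only [List.all_eq_true, List.mem_range] at h
        have := h el hel
        rcases Bool.or_eq_true _ _ |>.mp this with h2 | h2
        · exact absurd hm (by simpa using h2)
        · simpa using h2
    rw [merge_eq_render a b in_s.toList ha hab p hp htake hsafe]
  · rw [if_neg (fun hh => hcnt ((able_eq_count a b hab).mp hh))]
    cases hg : (((List.range a.length).foldl
        (fun d k => d.insert (a.set k (1 - a.getD k 0)) k) PySem.Dict.empty).get? (b.take a.length)) with
    | none => rfl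
    | some p =>
      exfalso
      obtain ⟨hp, hfp⟩ := (dict_range_get? a.length
        (fun k => a.set k (1 - a.getD k 0)) (flip_inj a ha) (b.take a.length) p).mp hg
      exact hcnt ((count_iff_flip a b ha hb hab).mpr ⟨p, hp, hfp.symm⟩)
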